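-- pv_equiv track=rewrite | github.com/dawnmorning/algo-swea | for im/programmers_secretmap.py | solution
-- ===== SOURCE A (Python) =====
-- def solution(n, arr1, arr2):
--     answer = []
--     map1 = []
--     map2 = []
--     for i in arr1:
--         map = []
--         for _ in range(n):
--             num = i % 2
--             i = i // 2
--             map.insert(0,num)
--         map1.append(map)
--     for j in arr2:
--         map = []
--         for _ in range(n):
--             num = j % 2
--             j = j // 2
--             map.insert(0,num)
--         map2.append(map)
--     for k in range(n):
--         map = ''
--         for l in range(n):
--             if map1[k][l] == 1 or map2[k][l] == 1:
--                 map += '#'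
--             else:
--                 map += ' '
--         answer.append(map)
--     return answer
-- ===== SOURCE B (Python) =====
-- def solution(n, arr1, arr2):
--     # Closed-form bit test per cell against precomputed powers of two: no bit matrices, no insert(0, ...).
--     pows = [1 << s for s in range(n)]
--     return [''.join('#' if (arr1[k] // pows[n - 1 - j]) % 2 or (arr2[k] // pows[n - 1 - j]) % 2
--                     else ' '
--                     for j in range(n))
--             for k in range(n)]
-- ===== Notes on version B (the rewrite author's own statement) =====
-- stated objective: alternative
-- what changed: A builds two full n-by-n bit matrices by repeated halving with list.insert(0,...) and then ORs them cell by cell in a third nested indexed loop; B is a single comprehension that tests each cell's bit in closed form ((arr[k] // pows[n-1-j]) % 2) against a precomputed table of powers of two, building no intermediate matrices.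
import Mathlib
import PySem

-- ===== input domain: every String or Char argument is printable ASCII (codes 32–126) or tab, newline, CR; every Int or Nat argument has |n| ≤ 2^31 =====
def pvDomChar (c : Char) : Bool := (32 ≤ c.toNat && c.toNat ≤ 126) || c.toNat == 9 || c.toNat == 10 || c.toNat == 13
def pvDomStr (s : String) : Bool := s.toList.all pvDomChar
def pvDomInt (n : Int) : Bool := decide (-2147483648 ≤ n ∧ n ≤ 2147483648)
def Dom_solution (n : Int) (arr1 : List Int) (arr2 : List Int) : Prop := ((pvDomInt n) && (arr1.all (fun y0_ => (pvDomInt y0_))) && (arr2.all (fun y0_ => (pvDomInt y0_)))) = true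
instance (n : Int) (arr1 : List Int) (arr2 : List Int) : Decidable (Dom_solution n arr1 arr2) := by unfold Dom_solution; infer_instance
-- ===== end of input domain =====

-- B replaces A's two bit-matrix-building loops (repeated halving with insert(0,…)) and the third
-- nested indexing loop by a single zip comprehension with a closed-form bit test per cell.

-- ===== PORT A =====
-- A's inner 'for _ in range(n): num = i % 2; i = i // 2; map.insert(0, num)' loop (it appears
-- twice in A, once per array, with identical code).
def pvBitsRow (n : Int) (i : Int) : List Int :=
  ((PySem.List.pyRange 0 n 1).foldl
    (fun s _ => (PySem.Int.floordiv s.1 2, PySem.Int.mod s.1 2 :: s.2)) (i, ([] : List Int))).2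

def solution (n : Int) (arr1 : List Int) (arr2 : List Int) : List String :=
  let map1 := arr1.foldl (fun acc i => acc ++ [pvBitsRow n i]) []
  let map2 := arr2.foldl (fun acc j => acc ++ [pvBitsRow n j]) []
  (PySem.List.pyRange 0 n 1).foldl (fun answer k =>
    answer ++ [String.mk ((PySem.List.pyRange 0 n 1).foldl (fun m l =>
      m ++ (if PySem.List.pyGetD (PySem.List.pyGetD map1 k []) l 0 = 1 ∨
               PySem.List.pyGetD (PySem.List.pyGetD map2 k []) l 0 = 1
            then ['#'] else [' '])) ([] : List Char))]) []

-- ===== PORT B =====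
def solution_alt (n : Int) (arr1 : List Int) (arr2 : List Int) : List String :=
  let pows := (PySem.List.pyRange 0 n 1).map (fun s => (1 : Int) <<< s.toNat)
  (PySem.List.pyRange 0 n 1).map (fun k => String.mk ((PySem.List.pyRange 0 n 1).map (fun j =>
    if PySem.Int.mod (PySem.Int.floordiv (PySem.List.pyGetD arr1 k 0)
          (PySem.List.pyGetD pows (n - 1 - j) 0)) 2 ≠ 0 ∨
       PySem.Int.mod (PySem.Int.floordiv (PySem.List.pyGetD arr2 k 0)
          (PySem.List.pyGetD pows (n - 1 - j) 0)) 2 ≠ 0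
    then '#' else ' ')))

-- ===== PRECONDITION & SPEC =====
-- Pre_ excludes exactly the inputs on which A raises: n > len(arr1) or n > len(arr2),
-- where map1[k] / map2[k] raises IndexError (B raises there too).
def Pre_solution (n : Int) (arr1 : List Int) (arr2 : List Int) : Prop :=
  n ≤ arr1.length ∧ n ≤ arr2.length
instance (n : Int) (arr1 : List Int) (arr2 : List Int) : Decidable (Pre_solution n arr1 arr2) := by
  unfold Pre_solution; infer_instance

def pvWitness_solution : Int × List Int × List Int := (2, [9, 20], [30, 1])

def Spec_solution (n : Int) (arr1 : List Int) (arr2 : List Int) (out : List String) : Prop :=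
  out = solution_alt n arr1 arr2
instance (n : Int) (arr1 : List Int) (arr2 : List Int) (out : List String) :
    Decidable (Spec_solution n arr1 arr2 out) := by unfold Spec_solution; infer_instance

-- ===== CLAIM (what is proved, stated in full; the proofs are below) =====
def Claim_equal_solution : Prop := ∀ (n : Int) (arr1 : List Int) (arr2 : List Int),
  Dom_solution n arr1 arr2 → Pre_solution n arr1 arr2 →
  Spec_solution n arr1 arr2 (solution n arr1 arr2)

-- ===== LEMMAS AND PROOFS =====

-- the bit A's halving loop produces, in closed form
def pvBit (t : Nat) (i : Int) : Int := PySem.Int.mod (PySem.Int.floordiv i (2 ^ t)) 2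

-- the halving loop as a recursion on the trip count
def pvBitsAux : Nat → Int → List Int → Int × List Int
  | 0, i, acc => (i, acc)
  | m + 1, i, acc => pvBitsAux m (PySem.Int.floordiv i 2) (PySem.Int.mod i 2 :: acc)

theorem pvFoldl_ignore_eq_bitsAux (l : List Int) :
    ∀ (i : Int) (acc : List Int),
      l.foldl (fun s (_ : Int) => (PySem.Int.floordiv s.1 2, PySem.Int.mod s.1 2 :: s.2)) (i, acc)
        = pvBitsAux l.length i acc := by
  induction l with
  | nil => intro i acc; rfl
  | cons x xs ih => intro i acc; simpa [pvBitsAux] using ih _ _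

theorem pvFdiv_two_pow (i : Int) (t : Nat) :
    PySem.Int.floordiv (PySem.Int.floordiv i 2) (2 ^ t) = PySem.Int.floordiv i (2 ^ (t + 1)) := by
  simp only [PySem.Int.floordiv]
  rw [Int.fdiv_eq_ediv_of_nonneg _ (by positivity), Int.fdiv_eq_ediv_of_nonneg _ (by norm_num),
      Int.fdiv_eq_ediv_of_nonneg _ (by positivity), pow_succ, mul_comm (2 ^ t : Int) 2]
  exact Int.ediv_ediv_of_nonneg (by norm_num)

theorem pvBitsAux_snd : ∀ (m : Nat) (i : Int) (acc : List Int),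
    (pvBitsAux m i acc).2 = ((List.range m).map (fun t => pvBit t i)).reverse ++ acc := by
  intro m
  induction m with
  | zero => intro i acc; simp [pvBitsAux]
  | succ m ih =>
    intro i acc
    rw [pvBitsAux, ih]
    have hb : (List.range m).map (fun t => pvBit t (PySem.Int.floordiv i 2))
        = (List.range m).map (fun t => pvBit (t + 1) i) :=
      List.map_congr_left (fun t _ => by rw [pvBit, pvBit, pvFdiv_two_pow])
    have h0 : PySem.Int.mod i 2 = pvBit 0 i := by simp [pvBit, PySem.Int.floordiv]
    rw [hb, h0, List.range_succ_eq_map]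
    simp [List.map_map, Function.comp_def, Nat.succ_eq_add_one]

theorem pvBitsRow_eq (m : Nat) (i : Int) :
    pvBitsRow (m : Int) i = ((List.range m).map (fun t => pvBit t i)).reverse := by
  rw [pvBitsRow, PySem.List.pyRange_zero_natCast, pvFoldl_ignore_eq_bitsAux]
  simp [pvBitsAux_snd]

theorem pvBitsRow_get (m : Nat) (i : Int) (l : Nat) (hl : l < m) :
    (pvBitsRow (m : Int) i).getD l 0 = pvBit (m - 1 - l) i := by
  rw [pvBitsRow_eq m i]
  rw [List.getD_eq_getElem _ _ (by simpa using hl)]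
  rw [List.getElem_reverse]
  simp only [List.getElem_map, List.getElem_range, List.length_map, List.length_range]

-- A as a double map over range m (its foldl loops unrolled)
theorem pvSolution_eq_map (m : Nat) (arr1 arr2 : List Int) :
    solution (m : Int) arr1 arr2 = (List.range m).map (fun k => String.mk
      ((List.range m).map (fun l =>
        if ((arr1.map (pvBitsRow (m : Int))).getD k []).getD l 0 = 1 ∨
           ((arr2.map (pvBitsRow (m : Int))).getD k []).getD l 0 = 1
        then '#' else ' '))) := by
  rw [solution]
  simp only [PySem.List.foldl_append_singleton_eq_map, List.nil_append]
  rw [PySem.List.pyRange_zero_natCast]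
  have hif : ∀ (p : Prop) [Decidable p],
      (if p then (['#'] : List Char) else [' ']) = [if p then '#' else ' '] := by
    intro p _; split <;> rfl
  simp only [hif, PySem.List.foldl_append_singleton_eq_map, List.nil_append, List.map_map]
  refine List.map_congr_left (fun k _ => ?_)
  simp only [Function.comp_apply]
  congr 1
  refine List.map_congr_left (fun l _ => ?_)
  simp only [Function.comp_apply, PySem.List.pyGetD_natCast]

theorem pvMod_ne_zero_iff_one (a : Int) : PySem.Int.mod a 2 ≠ 0 ↔ PySem.Int.mod a 2 = 1 := by
  rcases PySem.Int.mod_two_eq a with h | h <;> rw [h] <;> simp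

-- ===== VERDICT (by name: the statement is the Claim_ definition above) =====
theorem pvPyRange_nonpos (n : Int) (h : n ≤ 0) : PySem.List.pyRange 0 n 1 = [] := by
  simp [PySem.List.pyRange]; omega

-- ===== VERDICT (by name: the statement is the Claim_ definition above) =====
theorem solution_spec : Claim_equal_solution := by
  intro n arr1 arr2 _hdom hpre
  obtain ⟨h1, h2⟩ := hpre
  unfold Spec_solution
  by_cases hn : n ≤ 0
  · rw [solution, solution_alt, pvPyRange_nonpos n hn]
    simp
  · have hn' : 0 ≤ n := by omega
    lift n to Nat using hn' with m
    have hm1 : m ≤ arr1.length := by exact_mod_cast h1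
    have hm2 : m ≤ arr2.length := by exact_mod_cast h2
    rw [pvSolution_eq_map m arr1 arr2]
    rw [solution_alt]
    rw [PySem.List.pyRange_zero_natCast, List.map_map]
    refine List.map_congr_left (fun k hk => ?_)
    have hkm : k < m := by simpa using hk
    simp only [Function.comp_apply]
    congr 1
    rw [List.map_map]
    refine List.map_congr_left (fun l hl => ?_)
    have hlm : l < m := by simpa using hl
    simp only [Function.comp_apply]
    have hrow1 : (arr1.map (pvBitsRow (m : Int))).getD k [] = pvBitsRow (m : Int) (arr1[k]'(by omega)) := by
      rw [List.getD_eq_getElem _ _ (by simpa using lt_of_lt_of_le hkm hm1)]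
      simp
    have hrow2 : (arr2.map (pvBitsRow (m : Int))).getD k [] = pvBitsRow (m : Int) (arr2[k]'(by omega)) := by
      rw [List.getD_eq_getElem _ _ (by simpa using lt_of_lt_of_le hkm hm2)]
      simp
    have hg1 : PySem.List.pyGetD arr1 (k : Int) 0 = arr1[k]'(by omega) := by
      rw [PySem.List.pyGetD_natCast, List.getD_eq_getElem _ _ (by omega)]
    have hg2 : PySem.List.pyGetD arr2 (k : Int) 0 = arr2[k]'(by omega) := by
      rw [PySem.List.pyGetD_natCast, List.getD_eq_getElem _ _ (by omega)]
    have hidx : ((m : Int) - 1 - (l : Int)) = ((m - 1 - l : Nat) : Int) := by omega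
    have hpow : PySem.List.pyGetD (((List.range m).map (fun k => ((k : Nat) : Int))).map
        (fun s => (1 : Int) <<< s.toNat)) ((m : Int) - 1 - (l : Int)) 0 = 2 ^ (m - 1 - l) := by
      rw [← PySem.List.pyRange_zero_natCast, hidx,
          PySem.List.pyGetD_map_pyRange _ m _ _ (by omega)]
      rw [Int.toNat_natCast, Int.shiftLeft_natCast_right, Int.shiftLeft_eq', one_mul]
      push_cast
      ring
    rw [hrow1, hrow2, hg1, hg2, hpow, pvBitsRow_get m _ l hlm, pvBitsRow_get m _ l hlm]
    simp only [pvMod_ne_zero_iff_one, pvBit]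
    rfl
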